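-- pv_equiv track=rewrite | github.com/hjalope/HGU24-1_PPS | 백준/Silver/13305. 주유소/주유소.py | least_cost
-- ===== SOURCE A (Python) =====
-- def least_cost(city, city_length, fuel_price):
--     total_cost = 0
--     min_price = fuel_price[0]
--
--     for i in range(city - 1):
--         if fuel_price[i] < min_price:
--             min_price = fuel_price[i]
--         total_cost += min_price * city_length[i]
--
--     return total_cost
-- ===== SOURCE B (Python) =====
-- def least_cost(city, city_length, fuel_price):
--     n = max(city - 1, 0)
--     # prefix sums of the segment lengths: pre[k] = city_length[0] + ... + city_length[k-1]
--     pre = [0]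
--     s = 0
--     for d in city_length[:n]:
--         s += d
--         pre.append(s)
--     # the cheapest price seen so far changes exactly at the strictly-descending
--     # record prices; charge each record price for its whole block of segments at once
--     total = 0
--     i = 0
--     while i < n:
--         j = i + 1
--         while j < n and not (fuel_price[j] < fuel_price[i]):
--             j += 1
--         total += fuel_price[i] * (pre[j] - pre[i])
--         i = j
--     return total
-- ===== Notes on version B (the rewrite author's own statement) =====
-- stated objective: alternative
-- what changed: A runs one fused loop updating a running minimum and accumulating cost per segment; B decomposes the trip into maximal blocks governed by each strictly-descending record price (next-smaller-element jumps) and charges each record price once for its whole block via a precomputed prefix-sum table of city_length.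
import Mathlib
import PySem

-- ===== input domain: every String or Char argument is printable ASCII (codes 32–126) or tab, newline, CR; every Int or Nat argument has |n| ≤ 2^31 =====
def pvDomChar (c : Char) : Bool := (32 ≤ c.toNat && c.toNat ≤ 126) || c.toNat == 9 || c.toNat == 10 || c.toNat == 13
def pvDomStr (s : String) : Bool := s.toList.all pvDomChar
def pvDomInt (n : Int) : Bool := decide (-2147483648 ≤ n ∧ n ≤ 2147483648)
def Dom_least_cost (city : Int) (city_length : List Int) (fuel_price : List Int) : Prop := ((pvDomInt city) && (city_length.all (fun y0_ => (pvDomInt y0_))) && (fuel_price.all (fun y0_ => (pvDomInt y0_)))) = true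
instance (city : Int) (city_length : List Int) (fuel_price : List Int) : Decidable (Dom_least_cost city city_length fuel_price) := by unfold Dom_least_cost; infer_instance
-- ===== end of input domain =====

-- B replaces A's fused running-minimum loop by a next-smaller-element block decomposition over a
-- prefix-sum table of city_length; alternative algorithm, same cost. Equal to A on Pre_ below.


-- ===== PORT A =====
def least_cost (city : Int) (city_length : List Int) (fuel_price : List Int) : Int :=
  -- total_cost = 0; min_price = fuel_price[0]; for i in range(city-1): …
  ((PySem.List.pyRange 0 (city - 1) 1).foldl
    (fun (s : Int × Int) i =>
      let fpi := PySem.List.pyGetD fuel_price i 0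
      let mp := if fpi < s.2 then fpi else s.2
      (s.1 + mp * PySem.List.pyGetD city_length i 0, mp))
    (0, PySem.List.pyGetD fuel_price 0 0)).1

-- ===== PORT B =====
def nextSmaller (fp : List Int) (n : Int) (v : Int) (j : Int) : Int :=
  if _h : j < n ∧ ¬ (PySem.List.pyGetD fp j 0 < v) then nextSmaller fp n v (j + 1) else j
termination_by (n - j).toNat
decreasing_by omega

lemma nextSmaller_ge (fp : List Int) (n v : Int) (j : Int) : j ≤ nextSmaller fp n v j := by
  fun_induction nextSmaller fp n v j with
  | case1 j h ih => omega
  | case2 j h => omega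

def outerLoop (fp : List Int) (pre : List Int) (n : Int) (i : Int) (total : Int) : Int :=
  if h : i < n then
    let j := nextSmaller fp n (PySem.List.pyGetD fp i 0) (i + 1)
    outerLoop fp pre n j
      (total + PySem.List.pyGetD fp i 0 * (PySem.List.pyGetD pre j 0 - PySem.List.pyGetD pre i 0))
  else total
termination_by (n - i).toNat
decreasing_by have := nextSmaller_ge fp n (PySem.List.pyGetD fp i 0) (i + 1); omega

def least_cost_alt (city : Int) (city_length : List Int) (fuel_price : List Int) : Int :=
  let n := max (city - 1) 0
  let pre := ((PySem.List.slice city_length none (some n)).foldl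
      (fun (st : List Int × Int) d => (st.1 ++ [st.2 + d], st.2 + d)) ([0], 0)).1
  outerLoop fuel_price pre n 0 0

-- ===== PRECONDITION & SPEC =====
-- Pre_ excludes exactly the inputs where A raises IndexError: empty fuel_price (fuel_price[0]),
-- or city - 1 exceeding the length of fuel_price or city_length (loop index out of range).
def Pre_least_cost (city : Int) (city_length : List Int) (fuel_price : List Int) : Prop :=
  fuel_price ≠ [] ∧ city - 1 ≤ (fuel_price.length : Int) ∧ city - 1 ≤ (city_length.length : Int)
instance (city : Int) (city_length : List Int) (fuel_price : List Int) : Decidable (Pre_least_cost city city_length fuel_price) := by unfold Pre_least_cost; infer_instance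
def pvWitness_least_cost : Int × List Int × List Int := (4, [2, 3, 1], [5, 2, 4, 1])

def Spec_least_cost (city : Int) (city_length : List Int) (fuel_price : List Int) (out : Int) : Prop := out = least_cost_alt city city_length fuel_price
instance (city : Int) (city_length : List Int) (fuel_price : List Int) (out : Int) : Decidable (Spec_least_cost city city_length fuel_price out) := by unfold Spec_least_cost; infer_instance

-- ===== CLAIM (what is proved, stated in full; the proofs are below) =====
def Claim_equal_least_cost : Prop := ∀ (city : Int) (city_length : List Int) (fuel_price : List Int), Dom_least_cost city city_length fuel_price → Pre_least_cost city city_length fuel_price → Spec_least_cost city city_length fuel_price (least_cost city city_length fuel_price)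
-- ===== LEMMAS AND PROOFS =====

-- A's running minimum after processing indices 0..k, as a recursive table (proof helper).
def pmA (fp : List Int) : Nat → Int
  | 0 => fp.getD 0 0
  | k + 1 => let x := fp.getD (k + 1) 0; if x < pmA fp k then x else pmA fp k

-- A's whole loop, characterised: cost is the pmA-weighted sum, state is (cost, pmA (n-1)).
lemma foldlA_char (fp cl : List Int) (n : Nat) (h1 : n ≤ fp.length) (h2 : n ≤ cl.length) :
    ((PySem.List.pyRange 0 (n : Int) 1).foldl
      (fun (s : Int × Int) i =>
        let fpi := PySem.List.pyGetD fp i 0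
        let mp := if fpi < s.2 then fpi else s.2
        (s.1 + mp * PySem.List.pyGetD cl i 0, mp))
      (0, PySem.List.pyGetD fp 0 0))
    = (((List.range n).map (fun k => pmA fp k * cl.getD k 0)).sum, pmA fp (n - 1)) := by
  induction n with
  | zero => simp [PySem.List.pyRange_one_eq_nil, pmA, PySem.List.pyGetD_zero]
  | succ n ih =>
    have hstep : ((n : Int) : Int) ≤ ((n : Int) + 1) := by omega
    have : (PySem.List.pyRange 0 ((n + 1 : Nat) : Int) 1)
         = PySem.List.pyRange 0 (n : Int) 1 ++ [(n : Int)] := by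
      push_cast
      rw [PySem.List.pyRange_one_succ_right (by positivity)]
    rw [this, List.foldl_append, ih (by omega) (by omega)]
    simp only [List.foldl_cons, List.foldl_nil, List.range_succ, List.map_append, List.sum_append,
      List.map_cons, List.map_nil, List.sum_cons, List.sum_nil]
    have hget : PySem.List.pyGetD fp (n : Int) 0 = fp.getD n 0 := PySem.List.pyGetD_natCast ..
    have hgetc : PySem.List.pyGetD cl (n : Int) 0 = cl.getD n 0 := PySem.List.pyGetD_natCast ..
    rw [hget, hgetc]
    cases n with
    | zero =>
      simp [pmA]
    | succ m =>
      have : (m + 1) - 1 = m := by omega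
      rw [this]
      show (_ + (if fp.getD (m+1) 0 < pmA fp m then fp.getD (m+1) 0 else pmA fp m) * cl.getD (m+1) 0, _) = _
      rw [show (if fp.getD (m+1) 0 < pmA fp m then fp.getD (m+1) 0 else pmA fp m) = pmA fp (m+1) from rfl]
      simp [add_comm]

-- prefix-sum fold: the list built is [0, s1, s2, …] of the partial sums.
lemma presFold (xs : List Int) : ∀ (pre : List Int) (s : Int),
    (xs.foldl (fun (st : List Int × Int) d => (st.1 ++ [st.2 + d], st.2 + d)) (pre, s)).1
      = pre ++ (List.range xs.length).map (fun k => s + (xs.take (k + 1)).sum) := by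
  induction xs with
  | nil => intro pre s; simp
  | cons d xs ih =>
    intro pre s
    simp only [List.foldl_cons, ih, List.length_cons, List.range_succ_eq_map,
      List.map_cons, List.map_map]
    simp [Function.comp_def, List.append_assoc, add_assoc]

-- the inner while loop: first index ≥ j (capped at n) whose price beats v.
lemma nextSmaller_spec (fp : List Int) (n v : Int) (j : Int) (hjn : j ≤ n) :
    nextSmaller fp n v j ≤ n ∧
    (∀ m : Int, j ≤ m → m < nextSmaller fp n v j → ¬ PySem.List.pyGetD fp m 0 < v) ∧
    (nextSmaller fp n v j < n → PySem.List.pyGetD fp (nextSmaller fp n v j) 0 < v) := by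
  fun_induction nextSmaller fp n v j with
  | case1 j h ih =>
    obtain ⟨h1, h2, h3⟩ := ih (by omega)
    refine ⟨h1, fun m hm1 hm2 => ?_, h3⟩
    rcases eq_or_lt_of_le hm1 with rfl | hlt
    · exact h.2
    · exact h2 m (by omega) hm2
  | case2 j h =>
    refine ⟨?_, fun m hm1 hm2 => absurd hm1 (by omega), fun hlt => ?_⟩
    · by_contra hc; exact h ⟨by omega, fun hv => absurd hv (by tauto)⟩
    · by_contra hc; exact h ⟨hlt, hc⟩

-- the running minimum is constant on a block with no smaller price inside.
lemma pmA_const (fp : List Int) (i : Nat) (k : Nat) (hik : i ≤ k)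
    (hno : ∀ m : Nat, i < m → m ≤ k → ¬ fp.getD m 0 < pmA fp i) : pmA fp k = pmA fp i := by
  induction k, hik using Nat.le_induction with
  | base => rfl
  | succ k hik ih =>
    have hk : pmA fp k = pmA fp i := ih (fun m h1 h2 => hno m h1 (by omega))
    have : ¬ fp.getD (k + 1) 0 < pmA fp i := hno (k + 1) (by omega) le_rfl
    simp only [pmA, hk]
    simp only [List.getD_eq_getElem?_getD] at this
    simp [this]

-- splitting a range-indexed sum at a block boundary.
lemma S_block (f : Nat → Int) (i m : Nat) :
    ((List.range (i + m)).map f).sum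
      = ((List.range i).map f).sum + ((List.range m).map (fun t => f (i + t))).sum := by
  rw [List.range_add, List.map_append, List.sum_append, List.map_map]
  rfl

-- prefix sums of cl telescoped over a block.
lemma take_sum_block (cl : List Int) (i m : Nat) (h : i + m ≤ cl.length) :
    (cl.take (i + m)).sum
      = (cl.take i).sum + ((List.range m).map (fun t => cl.getD (i + t) 0)).sum := by
  induction m with
  | zero => simp
  | succ m ih =>
    have hm : i + m < cl.length := by omega
    have : cl.take (i + (m + 1)) = cl.take (i + m) ++ [cl[i + m]] := by
      rw [show i + (m + 1) = (i + m) + 1 from by omega]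
      exact List.take_succ_eq_append_getElem hm
    rw [this, List.sum_append, ih (by omega), List.range_succ, List.map_append]
    simp [List.getD_eq_getElem?_getD, List.getElem?_eq_getElem hm, add_assoc]

-- the outer while loop totals the pmA-weighted cost of the remaining segments.
lemma outer_char (fp cl pre : List Int) (nN : Nat) (hnf : nN ≤ fp.length) (hnc : nN ≤ cl.length)
    (hpre : ∀ k : Nat, k ≤ nN → pre.getD k 0 = (cl.take k).sum) :
    ∀ (d iN : Nat), nN - iN = d → iN ≤ nN → (iN < nN → fp.getD iN 0 = pmA fp iN) →
    ∀ total : Int,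
      outerLoop fp pre (nN : Int) (iN : Int) total
        = total + (((List.range nN).map (fun k => pmA fp k * cl.getD k 0)).sum
                 - ((List.range iN).map (fun k => pmA fp k * cl.getD k 0)).sum) := by
  intro d
  induction d using Nat.strong_induction_on with
  | _ d ih =>
    intro iN hd hile hmin total
    rw [outerLoop]
    by_cases hi : (iN : Int) < (nN : Int)
    · simp only [dif_pos hi]
      have hiN : iN < nN := by omega
      have hv : PySem.List.pyGetD fp (iN : Int) 0 = pmA fp iN := by
        rw [PySem.List.pyGetD_natCast]; exact hmin hiN
      set v := PySem.List.pyGetD fp (iN : Int) 0 with hvdef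
      have hge := nextSmaller_ge fp (nN : Int) v ((iN : Int) + 1)
      obtain ⟨hle, hnone, hsm⟩ := nextSmaller_spec fp (nN : Int) v ((iN : Int) + 1) (by omega)
      generalize hjj : nextSmaller fp (nN : Int) v ((iN : Int) + 1) = j at hge hle hnone hsm ⊢
      have hj0 : 0 ≤ j := by omega
      obtain ⟨jN, rfl⟩ : ∃ jN : Nat, (jN : Int) = j := ⟨j.toNat, Int.toNat_of_nonneg hj0⟩
      have hijN : iN + 1 ≤ jN := by omega
      have hjle : jN ≤ nN := by omega
      -- pmA is constantly v on [iN, jN)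
      have hconst : ∀ k : Nat, iN ≤ k → k < jN → pmA fp k = v := by
        intro k hk1 hk2
        rw [hv]
        refine pmA_const fp iN k hk1 (fun m h1 h2 => ?_)
        have := hnone (m : Int) (by omega) (by omega)
        rw [PySem.List.pyGetD_natCast] at this
        rw [← hv]; exact this
      -- the minimum hypothesis at the next block start
      have hminj : jN < nN → fp.getD jN 0 = pmA fp jN := by
        intro hjn
        have hlt : PySem.List.pyGetD fp (jN : Int) 0 < v := hsm (by omega)
        rw [PySem.List.pyGetD_natCast] at hlt
        have hk : pmA fp (jN - 1) = v := hconst (jN - 1) (by omega) (by omega)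
        have hj1 : jN = (jN - 1) + 1 := by omega
        rw [hj1]
        simp only [pmA, hk]
        rw [← hj1]
        simp only [List.getD_eq_getElem?_getD] at hlt ⊢
        simp [hlt]
      -- the block contribution
      have hblockS : ((List.range jN).map (fun k => pmA fp k * cl.getD k 0)).sum
          - ((List.range iN).map (fun k => pmA fp k * cl.getD k 0)).sum
          = v * ((cl.take jN).sum - (cl.take iN).sum) := by
        have h1 : jN = iN + (jN - iN) := by omega
        rw [h1, S_block, take_sum_block cl iN (jN - iN) (by omega)]
        have h2 : ∀ t ∈ List.range (jN - iN),
            pmA fp (iN + t) * cl.getD (iN + t) 0 = v * cl.getD (iN + t) 0 := by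
          intro t ht
          rw [hconst (iN + t) (by omega) (by have := List.mem_range.mp ht; omega)]
        rw [List.map_congr_left h2, List.sum_map_mul_left]
        ring
      have hpj : PySem.List.pyGetD pre (jN : Int) 0 = (cl.take jN).sum := by
        rw [PySem.List.pyGetD_natCast]; exact hpre jN hjle
      have hpi : PySem.List.pyGetD pre (iN : Int) 0 = (cl.take iN).sum := by
        rw [PySem.List.pyGetD_natCast]; exact hpre iN (by omega)
      rw [ih (nN - jN) (by omega) jN (by omega) hjle hminj]
      rw [hpj, hpi]
      linarith [hblockS]
    · simp only [dif_neg hi]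
      have : iN = nN := by omega
      subst this
      ring

-- ===== VERDICT (by name: the statement is the Claim_ definition above) =====
theorem least_cost_spec : Claim_equal_least_cost := by
  intro city cl fp _ hpre0
  obtain ⟨hfp, h1, h2⟩ := hpre0
  unfold Spec_least_cost
  simp only [least_cost, least_cost_alt]
  by_cases hneg : city - 1 ≤ 0
  · rw [PySem.List.pyRange_one_eq_nil hneg,
       show max (city - 1) 0 = 0 from by omega]
    rw [show (0 : Int) = ((0 : Nat) : Int) from rfl, PySem.List.slice_to_natCast]
    simp only [List.take_zero, List.foldl_nil, List.foldl_nil]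
    rw [outerLoop]
    simp
  · have hpos : 0 < city - 1 := by omega
    set nN : Nat := (city - 1).toNat with hn
    have hcn : ((nN : Nat) : Int) = city - 1 := Int.toNat_of_nonneg (by omega)
    have hnf : nN ≤ fp.length := by omega
    have hnc : nN ≤ cl.length := by omega
    rw [show max (city - 1) 0 = ((nN : Nat) : Int) from by omega,
        show city - 1 = ((nN : Nat) : Int) from hcn.symm]
    rw [foldlA_char fp cl nN hnf hnc]
    rw [PySem.List.slice_to_natCast, presFold]
    have hlen : (cl.take nN).length = nN := by simp [hnc]
    have hpre : ∀ k : Nat, k ≤ nN →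
        (([0] ++ (List.range (cl.take nN).length).map
            (fun k => 0 + ((cl.take nN).take (k + 1)).sum)).getD k 0) = (cl.take k).sum := by
      intro k hk
      cases k with
      | zero => simp
      | succ k =>
        have hklt : k < nN := by omega
        rw [List.singleton_append, List.getD_cons_succ]
        rw [List.getD_eq_getElem _ _ (by simp only [List.length_map, List.length_range, hlen]; omega)]
        simp only [List.getElem_map, List.getElem_range, zero_add]
        rw [List.take_take, Nat.min_eq_left (show k + 1 ≤ nN from by omega)]
    have hmain := outer_char fp cl _ nN hnf hnc hpre nN 0 (by omega) (by omega)
      (fun _ => by simp [pmA]) 0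
    push_cast at hmain
    rw [hmain]
    simp
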